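-- pv_equiv track=rewrite | github.com/KeonhoPark/algorithmStudy | PG_42586.py | solution
-- ===== SOURCE A (Python) =====
-- def solution(progresses, speeds):
--     r_day = list()
--     res = list()
--
--     for i in range(len(progresses)):
--         if (100 - progresses[i]) % speeds[i] == 0:
--             r_day.append((100 - progresses[i]) // speeds[i])
--         else:
--             r_day.append((100 - progresses[i]) // speeds[i] + 1)
--
--     MAX = r_day[0]
--     count = 0
--     for day in r_day:
--         if day > MAX:
--             MAX = day
--             res.append(count)
--             count = 1
--         else:
--             count += 1
--
--     res.append(count)
--
--     return res
-- ===== SOURCE B (Python) =====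
-- def solution(progresses, speeds):
--     days = [-((p - 100) // s) for p, s in zip(progresses, speeds)]
--     # a task j starts a new batch iff it needs strictly more days than every earlier task
--     record = [all(days[t] < days[j] for t in range(j)) for j in range(len(days))]
--     # batch id of task i = number of batch starts among tasks 0..i
--     bid = []
--     c = 0
--     for r in record:
--         c += r
--         bid.append(c)
--     # the answer is the histogram of the batch ids
--     return [bid.count(b) for b in range(1, sum(record) + 1)]
-- ===== Notes on version B (the rewrite author's own statement) =====
-- stated objective: alternative
-- what changed: Replaces A's stateful single sweep (running max + incremental batch counter) by a staged computation: each task is classified as a batch start by comparing it with all earlier tasks, batch ids are assigned by a prefix count of batch starts, and the answer is the histogram of these ids.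
import Mathlib
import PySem

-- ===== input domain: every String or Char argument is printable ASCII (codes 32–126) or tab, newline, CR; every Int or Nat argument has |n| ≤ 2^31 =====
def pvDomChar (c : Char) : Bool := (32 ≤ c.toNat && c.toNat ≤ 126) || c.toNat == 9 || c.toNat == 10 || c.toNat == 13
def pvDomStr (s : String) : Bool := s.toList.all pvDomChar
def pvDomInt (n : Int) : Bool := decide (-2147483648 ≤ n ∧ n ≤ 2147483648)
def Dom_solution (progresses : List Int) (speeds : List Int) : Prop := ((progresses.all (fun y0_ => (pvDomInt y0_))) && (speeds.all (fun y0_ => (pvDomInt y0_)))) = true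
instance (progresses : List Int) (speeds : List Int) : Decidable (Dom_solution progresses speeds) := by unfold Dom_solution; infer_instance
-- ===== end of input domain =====

-- B replaces A's stateful running-max/counter sweep by a stateless staged computation: it
-- classifies each task as a batch start by comparing it with ALL earlier tasks, assigns batch
-- ids by counting batch starts, and histograms the ids (alternative decomposition, not faster).

-- ===== PORT A =====
def solution (progresses : List Int) (speeds : List Int) : List Int :=
  let r_day := (PySem.List.pyRange 0 (progresses.length : Int) 1).foldl
    (fun acc i =>
      if PySem.Int.mod (100 - PySem.List.pyGetD progresses i 0) (PySem.List.pyGetD speeds i 0) = 0 then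
        acc ++ [PySem.Int.floordiv (100 - PySem.List.pyGetD progresses i 0) (PySem.List.pyGetD speeds i 0)]
      else
        acc ++ [PySem.Int.floordiv (100 - PySem.List.pyGetD progresses i 0) (PySem.List.pyGetD speeds i 0) + 1]) []
  let st := r_day.foldl
    (fun (st : Int × Int × List Int) day =>
      if day > st.1 then (day, 1, st.2.2 ++ [st.2.1]) else (st.1, st.2.1 + 1, st.2.2))
    (PySem.List.pyGetD r_day 0 0, 0, [])
  st.2.2 ++ [st.2.1]

-- ===== PORT B =====
def solution_alt (progresses : List Int) (speeds : List Int) : List Int :=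
  let days := (progresses.zip speeds).map (fun ps => -(PySem.Int.floordiv (ps.1 - 100) ps.2))
  let record := (PySem.List.pyRange 0 (days.length : Int) 1).map (fun j =>
    (PySem.List.pyRange 0 j 1).all (fun t =>
      decide (PySem.List.pyGetD days t 0 < PySem.List.pyGetD days j 0)))
  let bid := (record.foldl (fun (st : Int × List Int) r =>
      (st.1 + (if r then (1 : Int) else 0), st.2 ++ [st.1 + (if r then (1 : Int) else 0)]))
    ((0 : Int), ([] : List Int))).2
  (PySem.List.pyRange 1
      ((record.foldl (fun acc r => acc + (if r then (1 : Int) else 0)) 0) + 1) 1).map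
    (fun b => ((PySem.List.count bid b : Nat) : Int))

-- ===== PRECONDITION & SPEC =====
-- Pre_ excludes exactly the inputs on which A raises: empty progresses (IndexError on r_day[0]),
-- speeds shorter than progresses (IndexError), and a zero speed among the used ones (ZeroDivisionError).
def Pre_solution (progresses : List Int) (speeds : List Int) : Prop :=
  progresses ≠ [] ∧ progresses.length ≤ speeds.length ∧
    ∀ s ∈ speeds.take progresses.length, s ≠ 0
instance (progresses : List Int) (speeds : List Int) : Decidable (Pre_solution progresses speeds) := by
  unfold Pre_solution; infer_instance
def pvWitness_solution : List Int × List Int := ([93, 30, 55], [1, 30, 5])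

def Spec_solution (progresses : List Int) (speeds : List Int) (out : List Int) : Prop := out = solution_alt progresses speeds
instance (progresses : List Int) (speeds : List Int) (out : List Int) : Decidable (Spec_solution progresses speeds out) := by unfold Spec_solution; infer_instance

-- ===== CLAIM (what is proved, stated in full; the proofs are below) =====
def Claim_equal_solution : Prop := ∀ (progresses : List Int) (speeds : List Int), Dom_solution progresses speeds → Pre_solution progresses speeds → Spec_solution progresses speeds (solution progresses speeds)

-- ===== LEMMAS AND PROOFS =====

-- A's second loop: current leader m, current batch count c
def runs (m c : Int) : List Int → List Int
  | [] => [c]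
  | d :: ds => if d > m then c :: runs d 1 ds else runs m (c + 1) ds

-- canonical form: repeatedly split off the longest prefix bounded by its head
def batches : List Int → List Int
  | [] => []
  | d :: tl =>
    (((tl.takeWhile (fun x => decide (x ≤ d))).length : Int) + 1)
      :: batches (tl.dropWhile (fun x => decide (x ≤ d)))
termination_by l => l.length
decreasing_by
  simpa using Nat.lt_succ_of_le (List.length_dropWhile_le _ _)

-- B's building blocks, in Nat form: record flag, batch id, batch-id list, number of batches
def rcd (ds : List Int) (j : Nat) : Bool :=
  (List.range j).all (fun t => decide (ds.getD t 0 < ds.getD j 0))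
def nb (ds : List Int) (i : Nat) : Nat := (List.range (i + 1)).countP (rcd ds)
def bidl (ds : List Int) : List Nat := (List.range ds.length).map (nb ds)
def kk (ds : List Int) : Nat := (List.range ds.length).countP (rcd ds)
def cform (ds : List Int) : List Int :=
  (List.range (kk ds)).map (fun b => (((bidl ds).count (b + 1) : Nat) : Int))

theorem A_loop (ds : List Int) : ∀ (m c : Int) (res : List Int),
    (ds.foldl
        (fun (st : Int × Int × List Int) day =>
          if day > st.1 then (day, 1, st.2.2 ++ [st.2.1]) else (st.1, st.2.1 + 1, st.2.2))
        (m, c, res)).2.2 ++ [(ds.foldl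
        (fun (st : Int × Int × List Int) day =>
          if day > st.1 then (day, 1, st.2.2 ++ [st.2.1]) else (st.1, st.2.1 + 1, st.2.2))
        (m, c, res)).2.1] = res ++ runs m c ds := by
  induction ds with
  | nil => intro m c res; simp [runs]
  | cons d t ih =>
    intro m c res
    by_cases h : d > m
    · simp only [List.foldl_cons, if_pos h]
      rw [ih]
      simp [runs, h]
    · simp only [List.foldl_cons, if_neg h]
      rw [ih]
      simp [runs, h]

theorem runs_eq_batches (ds : List Int) : ∀ (m c : Int),
    runs m c ds
      = (c + ((ds.takeWhile (fun x => decide (x ≤ m))).length : Int))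
          :: batches (ds.dropWhile (fun x => decide (x ≤ m))) := by
  induction ds with
  | nil => intro m c; simp [runs, batches]
  | cons d tl ih =>
    intro m c
    by_cases h : d > m
    · have hd : (decide (d ≤ m)) = false := by simp; omega
      simp only [runs, if_pos h, List.takeWhile_cons, hd, List.dropWhile_cons, Bool.false_eq_true,
        if_false, List.length_nil]
      rw [ih d 1, batches]
      norm_num
      ring
    · have hd : (decide (d ≤ m)) = true := by simp; omega
      simp only [runs, if_neg h, List.takeWhile_cons, hd, List.dropWhile_cons, if_true,
        List.length_cons]
      rw [ih m (c + 1)]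
      congr 1
      push_cast
      ring

theorem runs_head (d0 : Int) (tl : List Int) : runs d0 0 (d0 :: tl) = batches (d0 :: tl) := by
  rw [runs_eq_batches (d0 :: tl) d0 0, batches]
  simp

theorem sumBool (l : List Bool) : ∀ (a : Int),
    l.foldl (fun acc r => acc + (if r then (1 : Int) else 0)) a = a + (l.countP id : Int) := by
  induction l with
  | nil => intro a; simp
  | cons r t ih =>
    intro a
    cases r <;> simp [ih] <;> try ring

theorem hrec (ds : List Int) :
    (PySem.List.pyRange 0 (ds.length : Int) 1).map (fun j =>
      (PySem.List.pyRange 0 j 1).all (fun t =>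
        decide (PySem.List.pyGetD ds t 0 < PySem.List.pyGetD ds j 0)))
    = (List.range ds.length).map (rcd ds) := by
  rw [PySem.List.pyRange_zero_natCast, List.map_map]
  apply List.map_congr_left
  intro j hj
  simp [PySem.List.pyRange_zero_natCast, List.all_map, rcd, Function.comp_def]

theorem scanCount (l : List Bool) : ∀ (c : Int) (acc : List Int),
    (l.foldl (fun (st : Int × List Int) r =>
        (st.1 + (if r then (1 : Int) else 0), st.2 ++ [st.1 + (if r then (1 : Int) else 0)]))
      (c, acc)).2
    = acc ++ (List.range l.length).map (fun i => c + (((l.take (i + 1)).countP id : Nat) : Int)) := by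
  induction l with
  | nil => intro c acc; simp
  | cons r t ih =>
    intro c acc
    simp only [List.foldl_cons]
    rw [ih, List.length_cons, List.range_succ_eq_map, List.map_cons, List.map_map]
    have h0 : ((r :: t).take 1).countP id = if r then 1 else 0 := by
      cases r <;> simp
    have h1 : ∀ i, ((r :: t).take (i + 1 + 1)).countP id
        = (if r then 1 else 0) + (t.take (i + 1)).countP id := by
      intro i
      rw [List.take_succ_cons, List.countP_cons]
      cases r <;> simp [id] <;> omega
    rw [List.append_assoc]
    congr 1
    rw [List.singleton_append]
    congr 1
    · rw [h0]
      cases r <;> simp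
    · apply List.map_congr_left
      intro i _
      simp only [Function.comp_apply, Nat.succ_eq_add_one, h1 i]
      cases r <;> (simp; try ring)

theorem B_eq (ds : List Int) :
    ((PySem.List.pyRange 1
      ((((PySem.List.pyRange 0 (ds.length : Int) 1).map (fun j =>
        (PySem.List.pyRange 0 j 1).all (fun t =>
          decide (PySem.List.pyGetD ds t 0 < PySem.List.pyGetD ds j 0)))).foldl
            (fun acc r => acc + (if r then (1 : Int) else 0)) 0) + 1) 1).map
      (fun b => ((PySem.List.count ((((PySem.List.pyRange 0 (ds.length : Int) 1).map (fun j =>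
          (PySem.List.pyRange 0 j 1).all (fun t =>
            decide (PySem.List.pyGetD ds t 0 < PySem.List.pyGetD ds j 0)))).foldl
          (fun (st : Int × List Int) r =>
            (st.1 + (if r then (1 : Int) else 0), st.2 ++ [st.1 + (if r then (1 : Int) else 0)]))
          ((0 : Int), ([] : List Int))).2) b : Nat) : Int)))
    = cform ds := by
  rw [hrec]
  have htot : ((List.range ds.length).map (rcd ds)).foldl
      (fun acc r => acc + (if r then (1 : Int) else 0)) 0 = (kk ds : Int) := by
    rw [sumBool]
    simp [List.countP_map, kk]
  rw [htot, scanCount, List.nil_append]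
  have hbid : (List.range ((List.range ds.length).map (rcd ds)).length).map
      (fun i => (0 : Int) + ((((((List.range ds.length).map (rcd ds)).take (i + 1)).countP id : Nat)) : Int))
      = (List.range ds.length).map (fun i => ((nb ds i : Nat) : Int)) := by
    simp only [List.length_map, List.length_range]
    apply List.map_congr_left
    intro i hi
    have hi' : i < ds.length := List.mem_range.mp hi
    rw [← List.map_take, List.take_range, Nat.min_eq_left (by omega)]
    simp [List.countP_map, nb]
  rw [hbid]
  rw [PySem.List.pyRange_one, List.map_map]
  have h2 : ((kk ds : Int) + 1 - 1).toNat = kk ds := by omega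
  rw [h2]
  unfold cform
  apply List.map_congr_left
  intro b hb
  rw [Function.comp_apply, PySem.List.count_eq]
  have h3 : ((1 : Int) + (b : Int)) = (((b + 1 : Nat)) : Int) := by push_cast; ring
  have h4 : (List.range ds.length).map (fun i => ((nb ds i : Nat) : Int))
      = (bidl ds).map (fun x : Nat => (x : Int)) := by
    simp [bidl, List.map_map, Function.comp_def]
  rw [h4, h3, List.count_map_of_injective _ _ Nat.cast_injective]

-- getD facts on ds = d :: (u ++ v)
theorem g1 (d : Int) (u v : List Int) (t : Nat) (ht : t < u.length) :
    (d :: (u ++ v)).getD (t + 1) 0 = u.getD t 0 := by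
  rw [List.getD_cons_succ]
  exact List.getD_append _ _ _ t ht

theorem g2 (d : Int) (u v : List Int) (t : Nat) :
    (d :: (u ++ v)).getD (1 + u.length + t) 0 = v.getD t 0 := by
  have h : 1 + u.length + t = (u.length + t) + 1 := by omega
  rw [h, List.getD_cons_succ, List.getD_append_right _ _ _ _ (by omega)]
  congr 1
  omega

theorem L1 (ds : List Int) : rcd ds 0 = true := by simp [rcd]

theorem L2 (d : Int) (u v : List Int) (hu : ∀ x ∈ u, x ≤ d) (j : Nat)
    (h1 : 1 ≤ j) (h2 : j ≤ u.length) : rcd (d :: (u ++ v)) j = false := by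
  rw [Bool.eq_false_iff]
  intro h
  rw [rcd, List.all_eq_true] at h
  have h0 := h 0 (List.mem_range.mpr (by omega))
  rw [decide_eq_true_iff] at h0
  obtain ⟨t, rfl⟩ : ∃ t, j = t + 1 := ⟨j - 1, by omega⟩
  rw [g1 d u v t (by omega)] at h0
  rw [show (d :: (u ++ v)).getD 0 0 = d from rfl] at h0
  have hmem : u.getD t 0 ∈ u := by
    rw [List.getD_eq_getElem _ _ (by omega)]
    exact List.getElem_mem _
  have := hu _ hmem
  omega

theorem L3 (d : Int) (u v : List Int) (hu : ∀ x ∈ u, x ≤ d)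
    (hv0 : ∀ _ : v ≠ [], d < v.getD 0 0) (j : Nat) (hj : j < v.length) :
    rcd (d :: (u ++ v)) (1 + u.length + j) = rcd v j := by
  have hne : v ≠ [] := by intro h; rw [h] at hj; simp at hj
  have hd0 : d < v.getD 0 0 := hv0 hne
  rw [Bool.eq_iff_iff]
  simp only [rcd, List.all_eq_true, List.mem_range, decide_eq_true_iff]
  rw [g2 d u v j]
  constructor
  · intro h t ht
    have := h (1 + u.length + t) (by omega)
    rwa [g2 d u v t] at this
  · intro h t ht
    have hdw : d < v.getD j 0 := by
      rcases Nat.eq_zero_or_pos j with h0 | h0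
      · rw [h0]; exact hd0
      · exact lt_trans hd0 (h 0 h0)
    by_cases ht0 : t = 0
    · rw [ht0, show (d :: (u ++ v)).getD 0 0 = d from rfl]; exact hdw
    · by_cases htu : t ≤ u.length
      · obtain ⟨t1, rfl⟩ : ∃ t1, t = t1 + 1 := ⟨t - 1, by omega⟩
        rw [g1 d u v t1 (by omega)]
        have hmem : u.getD t1 0 ∈ u := by
          rw [List.getD_eq_getElem _ _ (by omega)]
          exact List.getElem_mem _
        have := hu _ hmem
        omega
      · obtain ⟨t1, rfl⟩ : ∃ t1, t = 1 + u.length + t1 := ⟨t - 1 - u.length, by omega⟩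
        rw [g2 d u v t1]
        exact h t1 (by omega)

theorem Lnb_small (d : Int) (u v : List Int) (hu : ∀ x ∈ u, x ≤ d) (i : Nat)
    (hi : i ≤ u.length) : nb (d :: (u ++ v)) i = 1 := by
  rw [nb, List.range_succ_eq_map, List.countP_cons_of_pos (L1 _), List.countP_map]
  have hz : (List.range i).countP (rcd (d :: (u ++ v)) ∘ Nat.succ) = 0 := by
    rw [List.countP_eq_zero]
    intro j hj
    have hj' := List.mem_range.mp hj
    simp only [Function.comp_apply]
    rw [Nat.succ_eq_add_one, L2 d u v hu (j + 1) (by omega) (by omega)]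
    simp
  omega

theorem Lsplit (d : Int) (u v : List Int) (hu : ∀ x ∈ u, x ≤ d)
    (hv0 : ∀ _ : v ≠ [], d < v.getD 0 0) (m : Nat) (hm : m ≤ v.length) :
    (List.range (1 + u.length + m)).countP (rcd (d :: (u ++ v)))
      = 1 + (List.range m).countP (rcd v) := by
  rw [List.range_add, List.countP_append, List.countP_map]
  have h1 : (List.range (1 + u.length)).countP (rcd (d :: (u ++ v))) = 1 := by
    have := Lnb_small d u v hu u.length le_rfl
    rw [nb] at this
    rw [Nat.add_comm 1 u.length]
    exact this
  have h2 : (List.range m).countP (rcd (d :: (u ++ v)) ∘ fun x => 1 + u.length + x)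
      = (List.range m).countP (rcd v) := by
    apply List.countP_congr
    intro j hj
    have hj' := List.mem_range.mp hj
    simp only [Function.comp_apply]
    rw [L3 d u v hu hv0 j (by omega)]
  omega

theorem Lnb_big (d : Int) (u v : List Int) (hu : ∀ x ∈ u, x ≤ d)
    (hv0 : ∀ _ : v ≠ [], d < v.getD 0 0) (i : Nat) (hi : i < v.length) :
    nb (d :: (u ++ v)) (1 + u.length + i) = 1 + nb v i := by
  rw [nb, nb]
  have h : 1 + u.length + i + 1 = 1 + u.length + (i + 1) := by omega
  rw [h, Lsplit d u v hu hv0 (i + 1) (by omega)]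

theorem Lkk (d : Int) (u v : List Int) (hu : ∀ x ∈ u, x ≤ d)
    (hv0 : ∀ _ : v ≠ [], d < v.getD 0 0) :
    kk (d :: (u ++ v)) = 1 + kk v := by
  rw [kk, kk]
  have h : (d :: (u ++ v)).length = 1 + u.length + v.length := by simp; omega
  rw [h, Lsplit d u v hu hv0 v.length le_rfl]

theorem Lnb_pos (ws : List Int) (i : Nat) : 1 ≤ nb ws i := by
  rw [nb, List.range_succ_eq_map, List.countP_cons_of_pos (L1 _)]
  omega

theorem Lbidl (d : Int) (u v : List Int) (hu : ∀ x ∈ u, x ≤ d)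
    (hv0 : ∀ _ : v ≠ [], d < v.getD 0 0) :
    bidl (d :: (u ++ v)) = List.replicate (1 + u.length) 1 ++ (bidl v).map (fun x => 1 + x) := by
  rw [bidl]
  have h : (d :: (u ++ v)).length = 1 + u.length + v.length := by simp; omega
  rw [h, List.range_add, List.map_append, List.map_map]
  congr 1
  · rw [List.eq_replicate_iff]
    constructor
    · simp
    · intro b hb
      obtain ⟨i, hi, rfl⟩ := List.mem_map.mp hb
      exact Lnb_small d u v hu i (by have := List.mem_range.mp hi; omega)
  · rw [bidl, List.map_map]
    apply List.map_congr_left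
    intro i hi
    simp only [Function.comp_apply]
    rw [Lnb_big d u v hu hv0 i (List.mem_range.mp hi)]

theorem Lcount1 (d : Int) (u v : List Int) (hu : ∀ x ∈ u, x ≤ d)
    (hv0 : ∀ _ : v ≠ [], d < v.getD 0 0) :
    (bidl (d :: (u ++ v))).count 1 = 1 + u.length := by
  rw [Lbidl d u v hu hv0, List.count_append, List.count_replicate_self]
  have h0 : ((bidl v).map (fun x => 1 + x)).count 1 = 0 := by
    rw [List.count_eq_zero]
    intro hmem
    obtain ⟨x, hx, hx1⟩ := List.mem_map.mp hmem
    obtain ⟨i, _, rfl⟩ := List.mem_map.mp hx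
    have := Lnb_pos v i
    omega
  omega

theorem Lcountb (d : Int) (u v : List Int) (hu : ∀ x ∈ u, x ≤ d)
    (hv0 : ∀ _ : v ≠ [], d < v.getD 0 0) (b : Nat) :
    (bidl (d :: (u ++ v))).count (b + 2) = (bidl v).count (b + 1) := by
  rw [Lbidl d u v hu hv0, List.count_append]
  have h1 : (List.replicate (1 + u.length) 1).count (b + 2) = 0 := by
    rw [List.count_replicate]
    simp
  have hinj : Function.Injective (fun x : Nat => 1 + x) := fun x y h => by simpa using h
  have h2 : ((bidl v).map (fun x => 1 + x)).count (b + 2)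
      = (bidl v).count (b + 1) := by
    have : b + 2 = (fun x : Nat => 1 + x) (b + 1) := by simp; omega
    rw [this, List.count_map_of_injective _ _ hinj]
  omega

theorem cform_cons (d : Int) (u v : List Int) (hu : ∀ x ∈ u, x ≤ d)
    (hv0 : ∀ _ : v ≠ [], d < v.getD 0 0) :
    cform (d :: (u ++ v)) = ((u.length : Int) + 1) :: cform v := by
  rw [cform, Lkk d u v hu hv0, Nat.add_comm 1 (kk v), List.range_succ_eq_map,
    List.map_cons, List.map_map]
  congr 1
  · rw [Nat.zero_add, Lcount1 d u v hu hv0]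
    push_cast
    ring
  · rw [cform]
    apply List.map_congr_left
    intro b hb
    simp only [Function.comp_apply, Nat.succ_eq_add_one]
    rw [show b + 1 + 1 = b + 2 from rfl, Lcountb d u v hu hv0 b]

theorem cform_eq_batches_aux : ∀ (fuel : Nat) (ds : List Int), ds.length ≤ fuel →
    cform ds = batches ds := by
  intro fuel
  induction fuel with
  | zero =>
    intro ds h
    have hds : ds = [] := by cases ds with | nil => rfl | cons a t => simp at h
    rw [hds]
    simp [cform, kk, batches]
  | succ fuel ih =>
    intro ds h
    cases ds with
    | nil => simp [cform, kk, batches]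
    | cons d tl =>
      have htl : tl.takeWhile (fun x => decide (x ≤ d)) ++ tl.dropWhile (fun x => decide (x ≤ d)) = tl :=
        List.takeWhile_append_dropWhile
      have hu : ∀ x ∈ tl.takeWhile (fun x => decide (x ≤ d)), x ≤ d := by
        intro x hx
        have := List.mem_takeWhile_imp hx
        simpa using this
      have hv0 : ∀ _ : tl.dropWhile (fun x => decide (x ≤ d)) ≠ [],
          d < (tl.dropWhile (fun x => decide (x ≤ d))).getD 0 0 := by
        intro hne
        have hh := List.head_dropWhile_not (fun x => decide (x ≤ d)) hne
        rw [List.getD_eq_getElem _ _ (by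
          cases hvv : tl.dropWhile (fun x => decide (x ≤ d)) with
          | nil => exact absurd hvv hne
          | cons a t => simp)]
        rw [← List.head_eq_getElem hne] at *
        simp at hh
        omega
      rw [batches]
      have hgoal : cform (d :: tl) = cform (d :: (tl.takeWhile (fun x => decide (x ≤ d)) ++ tl.dropWhile (fun x => decide (x ≤ d)))) := by
        rw [htl]
      rw [hgoal, cform_cons d _ _ hu hv0,
        ih _ (le_trans (List.length_dropWhile_le _ _) (by simpa using h))]

theorem cform_eq_batches (ds : List Int) : cform ds = batches ds :=
  cform_eq_batches_aux ds.length ds le_rfl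

theorem foldl_ite_append (C : Int → Prop) [DecidablePred C] (E1 E2 : Int → Int) (L : List Int) :
    ∀ (acc : List Int),
      L.foldl (fun acc i => if C i then acc ++ [E1 i] else acc ++ [E2 i]) acc
        = acc ++ L.map (fun i => if C i then E1 i else E2 i) := by
  induction L with
  | nil => simp
  | cons x L ih =>
    intro acc
    by_cases h : C x
    · simp [h, ih]
    · simp [h, ih]

theorem ceil_eq (a b : Int) (hb : b ≠ 0) :
    (if PySem.Int.mod a b = 0 then PySem.Int.floordiv a b else PySem.Int.floordiv a b + 1)
      = -(PySem.Int.floordiv (-a) b) := by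
  have h1 := PySem.Int.floordiv_mul_add_mod a b
  have h2 := PySem.Int.floordiv_mul_add_mod (-a) b
  by_cases hm : PySem.Int.mod a b = 0
  · have hd : b ∣ a := (PySem.Int.mod_eq_zero_iff_dvd a b).mp hm
    have hm2 : PySem.Int.mod (-a) b = 0 :=
      (PySem.Int.mod_eq_zero_iff_dvd (-a) b).mpr hd.neg_right
    rw [if_pos hm]
    rw [hm] at h1; rw [hm2] at h2
    have hz : (PySem.Int.floordiv a b + PySem.Int.floordiv (-a) b) * b = 0 := by
      linear_combination h1 + h2
    rcases mul_eq_zero.mp hz with h | h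
    · omega
    · exact absurd h hb
  · rw [if_neg hm]
    have hm2 : PySem.Int.mod (-a) b ≠ 0 := by
      intro h
      have hd : b ∣ -a := (PySem.Int.mod_eq_zero_iff_dvd (-a) b).mp h
      exact hm ((PySem.Int.mod_eq_zero_iff_dvd a b).mpr (by simpa using hd.neg_right))
    have hk : (PySem.Int.floordiv a b + PySem.Int.floordiv (-a) b) * b
        = -(PySem.Int.mod a b + PySem.Int.mod (-a) b) := by
      linear_combination h1 + h2
    rcases lt_or_gt_of_ne hb with hneg | hpos
    · obtain ⟨hr1, hr2⟩ := PySem.Int.mod_neg_bounds (a := a) hneg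
      obtain ⟨hr3, hr4⟩ := PySem.Int.mod_neg_bounds (a := -a) hneg
      have hr2' : PySem.Int.mod a b < 0 := lt_of_le_of_ne hr2 hm
      have hr4' : PySem.Int.mod (-a) b < 0 := lt_of_le_of_ne hr4 hm2
      have k1 : PySem.Int.floordiv a b + PySem.Int.floordiv (-a) b < 0 := by
        by_contra hcon
        push Not at hcon
        have hp := mul_nonpos_of_nonneg_of_nonpos hcon hneg.le
        linarith [hk]
      have k2 : (-2 : Int) < PySem.Int.floordiv a b + PySem.Int.floordiv (-a) b := by
        by_contra hcon
        push Not at hcon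
        have hp := mul_le_mul_of_nonpos_right hcon hneg.le
        linarith [hk]
      omega
    · have hr1 := PySem.Int.mod_nonneg (a := a) hpos
      have hr2 := PySem.Int.mod_lt (a := a) hpos
      have hr3 := PySem.Int.mod_nonneg (a := -a) hpos
      have hr4 := PySem.Int.mod_lt (a := -a) hpos
      have hr1' : 0 < PySem.Int.mod a b := lt_of_le_of_ne hr1 (Ne.symm hm)
      have hr3' : 0 < PySem.Int.mod (-a) b := lt_of_le_of_ne hr3 (Ne.symm hm2)
      have k1 : PySem.Int.floordiv a b + PySem.Int.floordiv (-a) b < 0 := by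
        by_contra hcon
        push Not at hcon
        have hp := mul_nonneg hcon hpos.le
        linarith [hk]
      have k2 : (-2 : Int) < PySem.Int.floordiv a b + PySem.Int.floordiv (-a) b := by
        by_contra hcon
        push Not at hcon
        have hp := mul_le_mul_of_nonneg_right hcon hpos.le
        linarith [hk]
      omega

-- ===== VERDICT (by name: the statement is the Claim_ definition above) =====
theorem solution_spec : Claim_equal_solution := by
  intro progresses speeds _ hpre
  obtain ⟨hne, hlen, hz⟩ := hpre
  have hn : 0 < progresses.length := List.length_pos_iff.mpr hne
  unfold Spec_solution
  simp only [solution, solution_alt]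
  rw [foldl_ite_append]
  rw [List.nil_append]
  have hdays : (PySem.List.pyRange 0 (progresses.length : Int) 1).map
      (fun i => if PySem.Int.mod (100 - PySem.List.pyGetD progresses i 0) (PySem.List.pyGetD speeds i 0) = 0 then
          PySem.Int.floordiv (100 - PySem.List.pyGetD progresses i 0) (PySem.List.pyGetD speeds i 0)
        else
          PySem.Int.floordiv (100 - PySem.List.pyGetD progresses i 0) (PySem.List.pyGetD speeds i 0) + 1)
      = (progresses.zip speeds).map (fun ps => -(PySem.Int.floordiv (ps.1 - 100) ps.2)) := by
    rw [PySem.List.pyRange_zero_natCast, List.map_map]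
    apply List.ext_getElem
    · simp [List.length_zip]
      omega
    · intro k h1 h2
      simp only [List.getElem_map, List.getElem_range, Function.comp_apply, List.getElem_zip]
      have hk1 : k < progresses.length := by
        simpa using h1
      have hk2 : k < speeds.length := lt_of_lt_of_le hk1 hlen
      rw [PySem.List.pyGetD_natCast, PySem.List.pyGetD_natCast,
        List.getD_eq_getElem _ _ hk1, List.getD_eq_getElem _ _ hk2]
      have hkt : k < (speeds.take progresses.length).length := by
        simp [List.length_take]
        omega
      have hmem : (speeds.take progresses.length)[k] ∈ speeds.take progresses.length :=
        List.getElem_mem hkt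
      have htk : (speeds.take progresses.length)[k] = speeds[k] := by
        simp
      have hs : speeds[k] ≠ 0 := hz _ (htk ▸ hmem)
      rw [ceil_eq (100 - progresses[k]) speeds[k] hs]
      norm_num
  rw [hdays, B_eq, cform_eq_batches]
  rcases hdd : (progresses.zip speeds).map (fun ps => -(PySem.Int.floordiv (ps.1 - 100) ps.2))
    with _ | ⟨d0, dtl⟩
  · exfalso
    have := congrArg List.length hdd
    simp only [List.length_map, List.length_zip, List.length_nil] at this
    omega
  · rw [hdd, PySem.List.pyGetD_zero_cons, A_loop, List.nil_append, runs_head]
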